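-- pv_equiv track=rewrite | github.com/IagoAlm/DnD | funcDama.py | interpretador
-- ===== SOURCE A (Python) =====
-- import string
--
-- def interpretador(coordenadas):
--     try:
--         linha = str((int(coordenadas[0]) - 1))
--         for i in range(len(string.ascii_lowercase)):
--             if string.ascii_lowercase[i] == coordenadas[1].lower():
--                 coluna = str(i)
--         interp = linha + coluna
--         return interp
--     except:
--         return None
-- ===== SOURCE B (Python) =====
-- def interpretador(coordenadas):
--     try:
--         linha = int(coordenadas[0]) - 1
--         c = coordenadas[1].lower()
--         if not (len(c) == 1 and 'a' <= c <= 'z'):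
--             return None
--         return str(linha) + str(ord(c) - ord('a'))
--     except:
--         return None
-- ===== Notes on version B (the rewrite author's own statement) =====
-- stated objective: idiomatic
-- what changed: The 26-iteration scan over string.ascii_lowercase (whose not-found case is an unbound-variable NameError swallowed by the bare except) is replaced by a closed-form column computation from the character code, guarded by an explicit letter-range check with an explicit early return of None.
import Mathlib
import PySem

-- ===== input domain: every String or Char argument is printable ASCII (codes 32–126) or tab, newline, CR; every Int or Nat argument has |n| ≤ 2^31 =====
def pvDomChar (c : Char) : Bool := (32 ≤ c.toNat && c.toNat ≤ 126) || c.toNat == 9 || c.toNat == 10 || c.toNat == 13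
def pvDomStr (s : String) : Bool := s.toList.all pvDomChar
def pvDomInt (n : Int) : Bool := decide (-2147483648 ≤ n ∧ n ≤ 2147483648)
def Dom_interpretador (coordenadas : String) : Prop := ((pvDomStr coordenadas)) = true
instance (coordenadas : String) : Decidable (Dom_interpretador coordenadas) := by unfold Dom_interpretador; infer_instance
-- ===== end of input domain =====

-- B replaces A's 26-step scan of string.ascii_lowercase (whose 'not found' case is a NameError
-- caught by the bare except) by the closed form ord(c)-ord('a') behind an explicit range check.

-- ===== PORT A =====
def asciiLowercase : List Char := "abcdefghijklmnopqrstuvwxyz".toList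

-- coordenadas[1] is read inside the loop; it raises IndexError on the first of the 26 (always
-- executed) iterations when the string is too short, so it is hoisted above the loop — same result.
def interpretador (coordenadas : String) : Option String :=
  let cs := coordenadas.toList
  match PySem.List.pyGet? cs 0 with
  | none => none                                   -- IndexError → except → None
  | some c0 =>
    match PySem.Int.ofChars? [c0] with
    | none => none                                 -- ValueError → except → None
    | some v =>
      let linha := PySem.Int.toStr (v - 1)
      match PySem.List.pyGet? cs 1 with
      | none => none                               -- IndexError (first loop iteration) → None
      | some c1 =>
        let target := PySem.Chars.lowerChar c1
        let coluna := (List.range 26).foldl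
          (fun (acc : Option String) (i : Nat) =>
            match PySem.List.pyGet? asciiLowercase ((i : Int)) with
            | some ch => if ch = target then some (PySem.Int.toStr ((i : Int))) else acc
            | none => acc)
          none
        match coluna with
        | some col => some (linha ++ col)
        | none => none                             -- coluna never bound → NameError → None

-- ===== PORT B =====
def interpretador_alt (coordenadas : String) : Option String :=
  let cs := coordenadas.toList
  match PySem.List.pyGet? cs 0 with
  | none => none
  | some c0 =>
    match PySem.Int.ofChars? [c0] with
    | none => none
    | some v =>
      let linha := v - 1
      match PySem.List.pyGet? cs 1 with
      | none => none
      | some c1 =>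
        let c := PySem.Chars.lowerChar c1          -- one char in, one char out: len(c) == 1
        if 'a' ≤ c ∧ c ≤ 'z' then
          some (PySem.Int.toStr linha ++ PySem.Int.toStr ((c.toNat : Int) - ('a'.toNat : Int)))
        else none

-- ===== PRECONDITION & SPEC =====
def Spec_interpretador (coordenadas : String) (out : Option String) : Prop := out = interpretador_alt coordenadas
instance (coordenadas : String) (out : Option String) : Decidable (Spec_interpretador coordenadas out) := by unfold Spec_interpretador; infer_instance

-- ===== CLAIM (what is proved, stated in full; the proofs are below) =====
def Claim_equal_interpretador : Prop := ∀ (coordenadas : String), Dom_interpretador coordenadas → Spec_interpretador coordenadas (interpretador coordenadas)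

-- ===== LEMMAS AND PROOFS =====

theorem char_ofNat_toNat_lt (n : Nat) (h : n < 55296) : (Char.ofNat n).toNat = n := by
  have hv : Nat.isValidChar n := Or.inl h
  rw [Char.ofNat, dif_pos hv]
  show (UInt32.ofNatLT n _).toNat = n
  simp [UInt32.toNat_ofNatLT]

theorem char_eq_iff_toNat (n : Nat) (h : n < 55296) (t : Char) :
    Char.ofNat n = t ↔ t.toNat = n := by
  constructor
  · intro he; rw [← he, char_ofNat_toNat_lt n h]
  · intro he
    apply Char.ext
    apply UInt32.toNat_inj.mp
    show (Char.ofNat n).toNat = t.toNat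
    rw [char_ofNat_toNat_lt n h, he]

theorem scan_ofNat (t : Char) (n : Nat) (hn : n ≤ 26) :
    (List.range n).foldl
      (fun (acc : Option String) (i : Nat) =>
        if Char.ofNat (97 + i) = t then some (PySem.Int.toStr ((i : Int))) else acc)
      none
    = if 97 ≤ t.toNat ∧ t.toNat < 97 + n then some (PySem.Int.toStr ((t.toNat : Int) - 97)) else none := by
  induction n with
  | zero => simp
  | succ m ih =>
    rw [List.range_succ, List.foldl_append, ih (by omega)]
    simp only [List.foldl]
    by_cases he : Char.ofNat (97 + m) = t
    · have ht : t.toNat = 97 + m := (char_eq_iff_toNat _ (by omega) t).mp he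
      rw [if_pos he, if_pos (by omega)]
      have harith : ((t.toNat : Int) - 97) = (m : Int) := by omega
      rw [harith]
    · have ht : t.toNat ≠ 97 + m := fun h => he ((char_eq_iff_toNat _ (by omega) t).mpr h)
      rw [if_neg he]
      by_cases hb : 97 ≤ t.toNat ∧ t.toNat < 97 + m
      · rw [if_pos hb, if_pos (by omega)]
      · rw [if_neg hb, if_neg (by omega)]

theorem col_scan_eq (t : Char) :
    (List.range 26).foldl
      (fun (acc : Option String) (i : Nat) =>
        match PySem.List.pyGet? asciiLowercase ((i : Int)) with
        | some ch => if ch = t then some (PySem.Int.toStr ((i : Int))) else acc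
        | none => acc)
      none
    = if 'a' ≤ t ∧ t ≤ 'z' then some (PySem.Int.toStr ((t.toNat : Int) - ('a'.toNat : Int))) else none := by
  have key : ∀ (acc : Option String), ∀ i ∈ List.range 26,
      (match PySem.List.pyGet? asciiLowercase ((i : Int)) with
        | some ch => if ch = t then some (PySem.Int.toStr ((i : Int))) else acc
        | none => acc)
      = if Char.ofNat (97 + i) = t then some (PySem.Int.toStr ((i : Int))) else acc := by
    have hget : ∀ i ∈ List.range 26, PySem.List.pyGet? asciiLowercase ((i : Int)) = some (Char.ofNat (97 + i)) := by decide
    intro acc i hi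
    rw [hget i hi]
  have hfold :
      (List.range 26).foldl
        (fun (acc : Option String) (i : Nat) =>
          match PySem.List.pyGet? asciiLowercase ((i : Int)) with
          | some ch => if ch = t then some (PySem.Int.toStr ((i : Int))) else acc
          | none => acc)
        none
      = (List.range 26).foldl
        (fun (acc : Option String) (i : Nat) =>
          if Char.ofNat (97 + i) = t then some (PySem.Int.toStr ((i : Int))) else acc)
        none :=
    PySem.List.foldl_congr_mem _ _ _ _ (fun acc i hi => key acc i hi)
  rw [hfold, scan_ofNat t 26 (le_refl _)]
  have hle : ∀ a b : Char, a ≤ b ↔ a.toNat ≤ b.toNat := fun a b => by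
    rw [Char.le_def, UInt32.le_iff_toNat_le]
    exact Iff.rfl
  have hcond : ('a' ≤ t ∧ t ≤ 'z') ↔ (97 ≤ t.toNat ∧ t.toNat < 97 + 26) := by
    rw [hle 'a' t, hle t 'z']
    have ha : ('a').toNat = 97 := rfl
    have hz : ('z').toNat = 122 := rfl
    rw [ha, hz]
    omega
  have ha' : (('a').toNat : Int) = 97 := rfl
  rw [ha']
  by_cases h : 97 ≤ t.toNat ∧ t.toNat < 97 + 26
  · rw [if_pos h, if_pos (hcond.mpr h)]
  · rw [if_neg h, if_neg (fun hc => h (hcond.mp hc))]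

-- ===== VERDICT (by name: the statement is the Claim_ definition above) =====
theorem interpretador_spec : Claim_equal_interpretador := by
  intro s _
  simp only [Spec_interpretador, interpretador, interpretador_alt]
  cases h0 : PySem.List.pyGet? s.toList 0 with
  | none => simp
  | some c0 =>
    cases hv : PySem.Int.ofChars? [c0] with
    | none => simp [hv]
    | some v =>
      cases h1 : PySem.List.pyGet? s.toList 1 with
      | none => simp [hv]
      | some c1 =>
        simp only [hv, col_scan_eq]
        by_cases h : 'a' ≤ PySem.Chars.lowerChar c1 ∧ PySem.Chars.lowerChar c1 ≤ 'z' <;>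
          simp [h]
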